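-- pv_equiv track=rewrite | github.com/thevibethinker/n5os-ode | N5/scripts/blocks/decisions_extractor.py | _categorize_decisions
-- ===== SOURCE A (Python) =====
-- from typing import Dict, Any, List
--
-- def _categorize_decisions(decisions: List[Dict]) -> Dict[str, List[Dict]]:
--     """Categorize decisions by type."""
--     categorized = {
--         "Strategic": [],
--         "Product": [],
--         "Resource Allocation": [],
--         "Process": [],
--         "Tactical": []
--     }
--
--     for decision in decisions:
--         decision_type = decision.get("type", "Tactical")
--         if decision_type in categorized:
--             categorized[decision_type].append(decision)
--         else:
--             categorized["Tactical"].append(decision)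
--
--     return categorized
-- ===== SOURCE B (Python) =====
-- from typing import Dict, Any, List
--
-- def _categorize_decisions(decisions: List[Dict]) -> Dict[str, List[Dict]]:
--     """Categorize decisions by type: one filter pass per bucket."""
--     named = ("Strategic", "Product", "Resource Allocation", "Process")
--     result = {t: [d for d in decisions if d.get("type", "Tactical") == t]
--               for t in named}
--     result["Tactical"] = [d for d in decisions
--                           if d.get("type", "Tactical") not in named]
--     return result
-- ===== Notes on version B (the rewrite author's own statement) =====
-- stated objective: alternative
-- what changed: Replaces A's single-pass loop that appends each decision into a mutable five-bucket dict with five independent filter passes: one equality filter per named type and a not-in-the-named-types filter for the Tactical fallback, assembled in the original key order.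
import Mathlib
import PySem

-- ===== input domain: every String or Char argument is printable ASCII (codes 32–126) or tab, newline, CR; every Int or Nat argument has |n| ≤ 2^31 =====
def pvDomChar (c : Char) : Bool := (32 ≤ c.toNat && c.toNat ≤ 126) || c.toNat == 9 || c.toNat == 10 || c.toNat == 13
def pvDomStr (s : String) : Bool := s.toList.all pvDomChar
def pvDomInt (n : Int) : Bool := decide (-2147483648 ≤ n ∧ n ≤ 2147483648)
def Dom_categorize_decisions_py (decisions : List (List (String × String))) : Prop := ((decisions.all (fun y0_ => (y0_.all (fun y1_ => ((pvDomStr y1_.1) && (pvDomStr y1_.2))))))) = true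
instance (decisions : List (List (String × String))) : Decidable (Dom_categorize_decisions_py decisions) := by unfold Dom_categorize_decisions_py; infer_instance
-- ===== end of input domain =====

-- B replaces A's single-pass dict-append loop by one independent filter pass per bucket (objective: alternative decomposition).

-- ===== PORT A =====
-- A's loop step: look up the decision's type with default "Tactical", append to that
-- bucket if it is a key of the dict, else to "Tactical".
def pvStepA (c : PySem.Dict String (List (List (String × String)))) (d : List (String × String)) :
    PySem.Dict String (List (List (String × String))) :=
  let decision_type := (PySem.Dict.mk d).getD "type" "Tactical"
  if c.contains decision_type then c.modify decision_type [] (· ++ [d])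
  else c.modify "Tactical" [] (· ++ [d])

def categorize_decisions_py (decisions : List (List (String × String))) : List (String × List (List (String × String))) :=
  let categorized : PySem.Dict String (List (List (String × String))) :=
    PySem.Dict.mk [("Strategic", []), ("Product", []), ("Resource Allocation", []), ("Process", []), ("Tactical", [])]
  (decisions.foldl pvStepA categorized).items

-- ===== PORT B =====
-- B's helper: decision.get("type", "Tactical")
def pvGetType (d : List (String × String)) : String :=
  (PySem.Dict.mk d).getD "type" "Tactical"

def categorize_decisions_py_alt (decisions : List (List (String × String))) : List (String × List (List (String × String))) :=
  let named := ["Strategic", "Product", "Resource Allocation", "Process"]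
  (named.map (fun t => (t, decisions.filter (fun d => pvGetType d == t)))) ++
    [("Tactical", decisions.filter (fun d => !(named.contains (pvGetType d))))]

-- ===== PRECONDITION & SPEC =====
def Spec_categorize_decisions_py (decisions : List (List (String × String))) (out : List (String × List (List (String × String)))) : Prop := out = categorize_decisions_py_alt decisions
instance (decisions : List (List (String × String))) (out : List (String × List (List (String × String)))) : Decidable (Spec_categorize_decisions_py decisions out) := by unfold Spec_categorize_decisions_py; infer_instance

-- ===== CLAIM (what is proved, stated in full; the proofs are below) =====
def Claim_equal_categorize_decisions_py : Prop := ∀ (decisions : List (List (String × String))), Dom_categorize_decisions_py decisions → Spec_categorize_decisions_py decisions (categorize_decisions_py decisions)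

-- ===== LEMMAS AND PROOFS =====
-- Loop invariant: folding A's step over a dict with the five fixed keys appends, to each
-- bucket, exactly B's filter of the processed suffix.
theorem pvLoopA (ds : List (List (String × String)))
    (s p r pc t : List (List (String × String))) :
    ds.foldl pvStepA (PySem.Dict.mk [("Strategic", s), ("Product", p), ("Resource Allocation", r), ("Process", pc), ("Tactical", t)]) =
    PySem.Dict.mk [("Strategic", s ++ ds.filter (fun d => pvGetType d == "Strategic")),
      ("Product", p ++ ds.filter (fun d => pvGetType d == "Product")),
      ("Resource Allocation", r ++ ds.filter (fun d => pvGetType d == "Resource Allocation")),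
      ("Process", pc ++ ds.filter (fun d => pvGetType d == "Process")),
      ("Tactical", t ++ ds.filter (fun d => !(["Strategic", "Product", "Resource Allocation", "Process"].contains (pvGetType d))))] := by
  induction ds generalizing s p r pc t with
  | nil => simp
  | cons d ds ih =>
    simp only [List.foldl_cons, List.filter_cons]
    have hstep : pvStepA (PySem.Dict.mk [("Strategic", s), ("Product", p), ("Resource Allocation", r), ("Process", pc), ("Tactical", t)]) d =
        (if pvGetType d == "Strategic" then
          PySem.Dict.mk [("Strategic", s ++ [d]), ("Product", p), ("Resource Allocation", r), ("Process", pc), ("Tactical", t)]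
        else if pvGetType d == "Product" then
          PySem.Dict.mk [("Strategic", s), ("Product", p ++ [d]), ("Resource Allocation", r), ("Process", pc), ("Tactical", t)]
        else if pvGetType d == "Resource Allocation" then
          PySem.Dict.mk [("Strategic", s), ("Product", p), ("Resource Allocation", r ++ [d]), ("Process", pc), ("Tactical", t)]
        else if pvGetType d == "Process" then
          PySem.Dict.mk [("Strategic", s), ("Product", p), ("Resource Allocation", r), ("Process", pc ++ [d]), ("Tactical", t)]
        else
          PySem.Dict.mk [("Strategic", s), ("Product", p), ("Resource Allocation", r), ("Process", pc), ("Tactical", t ++ [d])]) := by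
      unfold pvStepA
      rw [show (PySem.Dict.mk d).getD "type" "Tactical" = pvGetType d from rfl]
      by_cases h1 : pvGetType d = "Strategic"
      · simp [h1, PySem.Dict.contains, PySem.Dict.modify, PySem.Dict.insert, PySem.Dict.getD, PySem.Dict.get?]
      by_cases h2 : pvGetType d = "Product"
      · simp [h2, PySem.Dict.contains, PySem.Dict.modify, PySem.Dict.insert, PySem.Dict.getD, PySem.Dict.get?]
      by_cases h3 : pvGetType d = "Resource Allocation"
      · simp [h3, PySem.Dict.contains, PySem.Dict.modify, PySem.Dict.insert, PySem.Dict.getD, PySem.Dict.get?]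
      by_cases h4 : pvGetType d = "Process"
      · simp [h4, PySem.Dict.contains, PySem.Dict.modify, PySem.Dict.insert, PySem.Dict.getD, PySem.Dict.get?]
      by_cases h5 : pvGetType d = "Tactical"
      · simp [h5, PySem.Dict.contains, PySem.Dict.modify, PySem.Dict.insert, PySem.Dict.getD, PySem.Dict.get?]
      · simp [h1, h2, h3, h4, PySem.Dict.contains, PySem.Dict.modify, PySem.Dict.insert, PySem.Dict.getD, PySem.Dict.get?]
        rintro (h | h | h | h | h) <;>
          first
            | exact absurd h.symm h1
            | exact absurd h.symm h2
            | exact absurd h.symm h3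
            | exact absurd h.symm h4
            | exact absurd h.symm h5
    rw [hstep]
    by_cases h1 : pvGetType d = "Strategic"
    · simp [h1, ih]
    by_cases h2 : pvGetType d = "Product"
    · simp [h2, ih]
    by_cases h3 : pvGetType d = "Resource Allocation"
    · simp [h3, ih]
    by_cases h4 : pvGetType d = "Process"
    · simp [h4, ih]
    · simp [h1, h2, h3, h4, ih]

-- ===== VERDICT (by name: the statement is the Claim_ definition above) =====
theorem categorize_decisions_py_spec : Claim_equal_categorize_decisions_py := by
  intro decisions _
  show (decisions.foldl pvStepA (PySem.Dict.mk [("Strategic", []), ("Product", []), ("Resource Allocation", []), ("Process", []), ("Tactical", [])])).items = _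
  rw [pvLoopA]
  simp [categorize_decisions_py_alt]
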